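-- pv_equiv track=rewrite | github.com/morganrivers/emojikitchen | emoji-picker-tk.py | _find_combo_url
-- ===== SOURCE A (Python) =====
-- def _find_combo_url(entries, name1, name2):
--     for url, alt, _ in entries:
--         parts = alt.split("-", 1)
--         if len(parts) == 2:
--             if (parts[0] == name1 and parts[1] == name2) or \
--                (parts[0] == name2 and parts[1] == name1):
--                 return url
--     return None
-- ===== SOURCE B (Python) =====
-- def _find_combo_url(entries, name1, name2):
--     table = {}
--     for url, alt, _ in entries:
--         parts = alt.split("-", 1)
--         if len(parts) == 2:
--             key = (parts[0], parts[1]) if parts[0] <= parts[1] else (parts[1], parts[0])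
--             table.setdefault(key, url)
--     q = (name1, name2) if name1 <= name2 else (name2, name1)
--     return table.get(q)
-- ===== Notes on version B (the rewrite author's own statement) =====
-- stated objective: alternative
-- what changed: Replaces the scan-with-early-return by one pass that builds a dict keyed by the order-canonicalised name pair (setdefault keeps the first occurrence), followed by a single lookup of the canonicalised query pair.
import Mathlib
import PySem

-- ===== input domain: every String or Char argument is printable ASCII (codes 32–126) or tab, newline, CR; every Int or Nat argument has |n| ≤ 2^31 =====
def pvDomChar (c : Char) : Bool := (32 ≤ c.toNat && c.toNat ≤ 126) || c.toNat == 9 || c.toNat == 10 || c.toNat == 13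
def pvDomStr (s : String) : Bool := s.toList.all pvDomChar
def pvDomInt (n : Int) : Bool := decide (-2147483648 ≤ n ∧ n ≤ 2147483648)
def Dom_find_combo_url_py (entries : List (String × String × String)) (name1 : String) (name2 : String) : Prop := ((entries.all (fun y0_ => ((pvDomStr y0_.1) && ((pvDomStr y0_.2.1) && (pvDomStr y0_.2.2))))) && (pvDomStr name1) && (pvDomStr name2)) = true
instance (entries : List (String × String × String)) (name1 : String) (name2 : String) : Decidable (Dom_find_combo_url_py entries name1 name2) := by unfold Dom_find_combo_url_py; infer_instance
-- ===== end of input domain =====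

-- B builds a dict keyed by the order-canonicalised name pair (first occurrence wins via
-- setdefault) and then makes one lookup, instead of A's scan with early return.

-- ===== PORT A =====
-- literal port of A: scan entries, split each alt at the first '-', return the first url
-- whose two parts match (name1, name2) in either order
def find_combo_url_py (entries : List (String × String × String)) (name1 : String) (name2 : String) : Option String :=
  match entries with
  | [] => none
  | (url, alt, _) :: rest =>
    match (PySem.Str.splitMax? alt "-" 1).getD [] with
    | [p0, p1] =>
      if (p0 == name1 && p1 == name2) || (p0 == name2 && p1 == name1) then some url
      else find_combo_url_py rest name1 name2
    | _ => find_combo_url_py rest name1 name2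

-- ===== PORT B =====
-- Python's `s <= t` on strings: lexicographic comparison of the code points
def pvStrLeChars : List Char → List Char → Bool
  | [], _ => true
  | _ :: _, [] => false
  | a :: as, b :: bs => if a < b then true else if b < a then false else pvStrLeChars as bs

-- (parts[0], parts[1]) if parts[0] <= parts[1] else (parts[1], parts[0])
def pvComboKey (a b : String) : String × String :=
  if pvStrLeChars a.toList b.toList then (a, b) else (b, a)

def find_combo_url_py_alt (entries : List (String × String × String)) (name1 : String) (name2 : String) : Option String :=
  let table := entries.foldl (fun t e =>
      let parts := (PySem.Str.splitMax? e.2.1 "-" 1).getD []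
      if parts.length == 2 then
        t.setdefault (pvComboKey (parts.getD 0 "") (parts.getD 1 "")) e.1
      else t) PySem.Dict.empty
  table.get? (pvComboKey name1 name2)

-- ===== PRECONDITION & SPEC =====
def Spec_find_combo_url_py (entries : List (String × String × String)) (name1 : String) (name2 : String) (out : Option String) : Prop := out = find_combo_url_py_alt entries name1 name2
instance (entries : List (String × String × String)) (name1 : String) (name2 : String) (out : Option String) : Decidable (Spec_find_combo_url_py entries name1 name2 out) := by unfold Spec_find_combo_url_py; infer_instance

-- ===== CLAIM (what is proved, stated in full; the proofs are below) =====
def Claim_equal_find_combo_url_py : Prop := ∀ (entries : List (String × String × String)) (name1 : String) (name2 : String), Dom_find_combo_url_py entries name1 name2 → Spec_find_combo_url_py entries name1 name2 (find_combo_url_py entries name1 name2)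

-- ===== LEMMAS AND PROOFS =====

theorem pvStrLeChars_total (a b : List Char) (h : pvStrLeChars a b = false) : pvStrLeChars b a = true := by
  induction a generalizing b with
  | nil => simp [pvStrLeChars] at h
  | cons x xs ih =>
    cases b with
    | nil => simp [pvStrLeChars]
    | cons y ys =>
      simp only [pvStrLeChars] at h ⊢
      rcases lt_trichotomy x y with h1 | h1 | h1
      · simp [h1] at h
      · subst h1; simp only [lt_irrefl, if_false] at h ⊢; exact ih _ h
      · simp [h1, lt_asymm h1] at h ⊢

theorem pvStrLeChars_antisymm (a b : List Char) (h1 : pvStrLeChars a b = true) (h2 : pvStrLeChars b a = true) : a = b := by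
  induction a generalizing b with
  | nil =>
    cases b with
    | nil => rfl
    | cons y ys => simp [pvStrLeChars] at h2
  | cons x xs ih =>
    cases b with
    | nil => simp [pvStrLeChars] at h1
    | cons y ys =>
      simp only [pvStrLeChars] at h1 h2
      rcases lt_trichotomy x y with hc | hc | hc
      · simp [hc, lt_asymm hc] at h2
      · subst hc; simp only [lt_irrefl, if_false] at h1 h2
        rw [ih _ h1 h2]
      · simp [hc, lt_asymm hc] at h1

theorem pvComboKey_eq_iff (a b c d : String) :
    pvComboKey a b = pvComboKey c d ↔ ((a = c ∧ b = d) ∨ (a = d ∧ b = c)) := by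
  have anti : ∀ s t : String, pvStrLeChars s.toList t.toList = true →
      pvStrLeChars t.toList s.toList = true → s = t := by
    intro s t hs ht
    have := pvStrLeChars_antisymm _ _ hs ht
    exact String.ext this
  unfold pvComboKey
  split_ifs with h1 h2 h2 <;> simp only [Prod.mk.injEq] <;> constructor
  · rintro ⟨rfl, rfl⟩; left; exact ⟨rfl, rfl⟩
  · rintro (⟨rfl, rfl⟩ | ⟨rfl, rfl⟩)
    · exact ⟨rfl, rfl⟩
    · have := anti _ _ h1 h2; exact ⟨this, this.symm⟩
  · rintro ⟨rfl, rfl⟩; right; exact ⟨rfl, rfl⟩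
  · rintro (⟨rfl, rfl⟩ | ⟨rfl, rfl⟩)
    · exact absurd h1 h2
    · exact ⟨rfl, rfl⟩
  · rintro ⟨rfl, rfl⟩; right; exact ⟨rfl, rfl⟩
  · rintro (⟨rfl, rfl⟩ | ⟨rfl, rfl⟩)
    · exact absurd h2 h1
    · exact ⟨rfl, rfl⟩
  · rintro ⟨rfl, rfl⟩; left; exact ⟨rfl, rfl⟩
  · rintro (⟨rfl, rfl⟩ | ⟨rfl, rfl⟩)
    · exact ⟨rfl, rfl⟩
    · exact absurd (pvStrLeChars_total _ _ (Bool.eq_false_iff.mpr h1)) h2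

-- the loop invariant: looking up the canonical query key in the table built from `entries`
-- on top of `t` gives t's binding if present, else A's scan result over `entries`
theorem pv_build_lookup (entries : List (String × String × String))
    (name1 name2 : String) (t : PySem.Dict (String × String) String) :
    (entries.foldl (fun t e =>
        let parts := (PySem.Str.splitMax? e.2.1 "-" 1).getD []
        if parts.length == 2 then
          t.setdefault (pvComboKey (parts.getD 0 "") (parts.getD 1 "")) e.1
        else t) t).get? (pvComboKey name1 name2)
      = ((t.get? (pvComboKey name1 name2)).elim
          (find_combo_url_py entries name1 name2) some) := by
  induction entries generalizing t with
  | nil => cases h : t.get? (pvComboKey name1 name2) <;> simp [find_combo_url_py, h]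
  | cons e rest ih =>
    obtain ⟨url, alt, extra⟩ := e
    simp only [List.foldl_cons, find_combo_url_py]
    cases hp : (PySem.Str.splitMax? alt "-" 1).getD [] with
    | nil => simp only [List.length_nil, ih]; rfl
    | cons p0 ps =>
      cases ps with
      | nil => simp only [List.length_cons, List.length_nil, ih]; rfl
      | cons p1 ps' =>
        cases ps' with
        | cons q qs => simp only [List.length_cons, ih]; rfl
        | nil =>
          simp only [List.length_cons, List.length_nil, List.getD_cons_zero,
            List.getD_cons_succ]
          by_cases hc : ((p0 == name1 && p1 == name2) || (p0 == name2 && p1 == name1)) = true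
          · have hkey : pvComboKey p0 p1 = pvComboKey name1 name2 := by
              rw [pvComboKey_eq_iff]
              simp only [Bool.or_eq_true, Bool.and_eq_true, beq_iff_eq] at hc
              tauto
            rw [ih]
            simp only [hkey, hc, if_true, Nat.reduceAdd, Nat.reduceBEq]
            rw [PySem.Dict.get?_setdefault_self]
            cases t.get? (pvComboKey name1 name2) <;> simp
          · have hkey : pvComboKey name1 name2 ≠ pvComboKey p0 p1 := by
              rw [Ne, pvComboKey_eq_iff]
              simp only [Bool.or_eq_true, Bool.and_eq_true, beq_iff_eq] at hc
              tauto
            rw [ih]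
            simp only [Nat.reduceAdd, Nat.reduceBEq, if_true]
            rw [PySem.Dict.get?_setdefault_of_ne _ _ hkey]
            simp [hc]

-- ===== VERDICT (by name: the statement is the Claim_ definition above) =====
theorem find_combo_url_py_spec : Claim_equal_find_combo_url_py := by
  intro entries name1 name2 _
  unfold Spec_find_combo_url_py find_combo_url_py_alt
  rw [pv_build_lookup]
  simp [PySem.Dict.empty, PySem.Dict.get?]
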